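-- pv_equiv track=rewrite | github.com/Nelluk/OntarioParks | scripts/op_roofed_watch.py | match_preference
-- ===== SOURCE A (Python) =====
-- from typing import Any, Dict, Iterable, List, Tuple, Optional
--
-- def normalize_site_token(s: str) -> Optional[str]:
--     digits = "".join(ch for ch in s if ch.isdigit())
--     return digits or None
--
-- def match_preference(resource_name: str, preferred: List[str]) -> Optional[int]:
--     """
--     Returns the index in the preference list if the resource_name matches.
--     Matching logic:
--     - Exact (case-insensitive) string match
--     - Numeric token match (e.g., '472' matches 'Site 472')
--     """
--     name_norm = resource_name.strip().lower()
--     name_digits = normalize_site_token(resource_name)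
--     for idx, pref in enumerate(preferred):
--         pref_norm = str(pref).strip().lower()
--         if pref_norm == name_norm:
--             return idx
--         pref_digits = normalize_site_token(pref_norm)
--         if pref_digits and name_digits and pref_digits == name_digits:
--             return idx
--     return None
-- ===== SOURCE B (Python) =====
-- from typing import List, Optional
--
-- def normalize_site_token(s: str) -> Optional[str]:
--     digits = "".join(ch for ch in s if ch.isdigit())
--     return digits or None
--
-- def match_preference(resource_name: str, preferred: List[str]) -> Optional[int]:
--     # Two independent searches (earliest exact match, earliest digit match),
--     # then the minimum of the indices found.
--     name_norm = resource_name.strip().lower()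
--     name_digits = normalize_site_token(resource_name)
--     exact_idx = next((i for i, p in enumerate(preferred)
--                       if str(p).strip().lower() == name_norm), None)
--     digit_idx = None
--     if name_digits:
--         digit_idx = next((i for i, p in enumerate(preferred)
--                           if normalize_site_token(str(p).strip().lower()) == name_digits), None)
--     candidates = [i for i in (exact_idx, digit_idx) if i is not None]
--     return min(candidates) if candidates else None
-- ===== Notes on version B (the rewrite author's own statement) =====
-- stated objective: alternative
-- what changed: Replaces A's single scan that tests exact-or-digit match per element with two independent earliest-index searches (exact match, digit match) combined by taking the minimum of the found indices.
import Mathlib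
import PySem

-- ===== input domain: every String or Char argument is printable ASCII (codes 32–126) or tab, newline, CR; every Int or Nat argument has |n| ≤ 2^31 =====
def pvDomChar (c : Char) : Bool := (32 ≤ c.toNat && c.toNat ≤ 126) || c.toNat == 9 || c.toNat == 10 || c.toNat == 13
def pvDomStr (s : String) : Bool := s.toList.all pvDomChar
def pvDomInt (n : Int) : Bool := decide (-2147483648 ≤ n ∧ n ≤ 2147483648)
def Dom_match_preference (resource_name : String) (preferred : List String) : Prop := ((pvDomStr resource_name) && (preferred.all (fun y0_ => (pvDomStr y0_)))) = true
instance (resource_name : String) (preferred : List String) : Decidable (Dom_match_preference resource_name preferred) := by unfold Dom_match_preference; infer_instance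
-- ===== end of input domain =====

-- B replaces A's single scan (exact-or-digit per element) by two independent
-- earliest-index searches combined with min; objective: alternative decomposition.

-- ===== PORT A =====
-- normalize_site_token: digits of s joined; '' is falsy -> None
def normTok (s : String) : Option String :=
  let digits := String.ofList (s.toList.filter PySem.Chars.isdigit)
  if digits == "" then none else some digits

def mpLoop (nameNorm : String) (nameDigits : Option String) : Nat → List String → Option Int
  | _, [] => none
  | idx, p :: rest =>
    let prefNorm := PySem.Str.lower (PySem.Str.strip p)
    if prefNorm == nameNorm then some (idx : Int)
    else
      let prefDigits := normTok prefNorm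
      if prefDigits.isSome && nameDigits.isSome && prefDigits == nameDigits then some (idx : Int)
      else mpLoop nameNorm nameDigits (idx + 1) rest

def match_preference (resource_name : String) (preferred : List String) : Option Int :=
  let nameNorm := PySem.Str.lower (PySem.Str.strip resource_name)
  let nameDigits := normTok resource_name
  mpLoop nameNorm nameDigits 0 preferred

-- ===== PORT B =====
-- next((i for i,p in enumerate(xs) if pred p), None)
def findIdxFrom (pred : String → Bool) : Nat → List String → Option Nat
  | _, [] => none
  | i, x :: xs => if pred x then some i else findIdxFrom pred (i + 1) xs

-- min of the present candidates, None if none present (as Option Int)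
def pvOptMin : Option Nat → Option Nat → Option Int
  | none, none => none
  | some i, none => some (i : Int)
  | none, some j => some (j : Int)
  | some i, some j => some ((min i j : Nat) : Int)

def match_preference_alt (resource_name : String) (preferred : List String) : Option Int :=
  let nameNorm := PySem.Str.lower (PySem.Str.strip resource_name)
  let nameDigits := normTok resource_name
  let exactIdx := findIdxFrom (fun p => PySem.Str.lower (PySem.Str.strip p) == nameNorm) 0 preferred
  let digitIdx :=
    match nameDigits with
    | none => none
    | some nd => findIdxFrom (fun p => normTok (PySem.Str.lower (PySem.Str.strip p)) == some nd) 0 preferred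
  pvOptMin exactIdx digitIdx

-- ===== PRECONDITION & SPEC =====
def Spec_match_preference (resource_name : String) (preferred : List String) (out : Option Int) : Prop := out = match_preference_alt resource_name preferred
instance (resource_name : String) (preferred : List String) (out : Option Int) : Decidable (Spec_match_preference resource_name preferred out) := by unfold Spec_match_preference; infer_instance

-- ===== CLAIM (what is proved, stated in full; the proofs are below) =====
def Claim_equal_match_preference : Prop := ∀ (resource_name : String) (preferred : List String), Dom_match_preference resource_name preferred → Spec_match_preference resource_name preferred (match_preference resource_name preferred)

-- ===== LEMMAS AND PROOFS =====

theorem findIdxFrom_ge (pred : String → Bool) (l : List String) (n i : Nat)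
    (h : findIdxFrom pred n l = some i) : n ≤ i := by
  induction l generalizing n with
  | nil => simp [findIdxFrom] at h
  | cons x xs ih =>
    simp only [findIdxFrom] at h
    split at h
    · cases h; exact le_refl _
    · exact Nat.le_of_succ_le (ih (n + 1) h)

theorem mpLoop_eq_some_nd (nameNorm nd : String) (l : List String) (n : Nat) :
    mpLoop nameNorm (some nd) n l =
      pvOptMin (findIdxFrom (fun p => PySem.Str.lower (PySem.Str.strip p) == nameNorm) n l)
               (findIdxFrom (fun p => normTok (PySem.Str.lower (PySem.Str.strip p)) == some nd) n l) := by
  induction l generalizing n with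
  | nil => simp [mpLoop, findIdxFrom, pvOptMin]
  | cons p rest ih =>
    by_cases hE : (PySem.Str.lower (PySem.Str.strip p) == nameNorm) = true
    · have hL : mpLoop nameNorm (some nd) n (p :: rest) = some (n : Int) := by
        simp [mpLoop, hE]
      have hRE : findIdxFrom (fun q => PySem.Str.lower (PySem.Str.strip q) == nameNorm) n (p :: rest) = some n := by
        simp [findIdxFrom, hE]
      rw [hL, hRE]
      rcases hD : findIdxFrom (fun q => normTok (PySem.Str.lower (PySem.Str.strip q)) == some nd) n (p :: rest) with _ | j
      · rfl
      · have hj : n ≤ j := findIdxFrom_ge _ _ _ _ hD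
        simp [pvOptMin, Nat.min_eq_left hj]
    · have hRE : findIdxFrom (fun q => PySem.Str.lower (PySem.Str.strip q) == nameNorm) n (p :: rest)
          = findIdxFrom (fun q => PySem.Str.lower (PySem.Str.strip q) == nameNorm) (n + 1) rest := by
        simp [findIdxFrom, hE]
      by_cases hDp : (normTok (PySem.Str.lower (PySem.Str.strip p)) == some nd) = true
      · have hone : (normTok (PySem.Str.lower (PySem.Str.strip p))).isSome = true := by
          cases h' : normTok (PySem.Str.lower (PySem.Str.strip p)) with
          | none => rw [h'] at hDp; simp at hDp
          | some v => simp
        have hL : mpLoop nameNorm (some nd) n (p :: rest) = some (n : Int) := by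
          simp [mpLoop, hE, hDp, hone]
        have hRD : findIdxFrom (fun q => normTok (PySem.Str.lower (PySem.Str.strip q)) == some nd) n (p :: rest) = some n := by
          simp [findIdxFrom, hDp]
        rw [hL, hRE, hRD]
        rcases hEr : findIdxFrom (fun q => PySem.Str.lower (PySem.Str.strip q) == nameNorm) (n + 1) rest with _ | i
        · rfl
        · have hi : n + 1 ≤ i := findIdxFrom_ge _ _ _ _ hEr
          simp [pvOptMin, Nat.min_eq_right (by omega : n ≤ i)]
      · have hL : mpLoop nameNorm (some nd) n (p :: rest) = mpLoop nameNorm (some nd) (n + 1) rest := by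
          simp [mpLoop, hE, hDp]
        have hRD : findIdxFrom (fun q => normTok (PySem.Str.lower (PySem.Str.strip q)) == some nd) n (p :: rest)
            = findIdxFrom (fun q => normTok (PySem.Str.lower (PySem.Str.strip q)) == some nd) (n + 1) rest := by
          simp [findIdxFrom, hDp]
        rw [hL, hRE, hRD, ih]

theorem mpLoop_eq_none_nd (nameNorm : String) (l : List String) (n : Nat) :
    mpLoop nameNorm none n l =
      pvOptMin (findIdxFrom (fun p => PySem.Str.lower (PySem.Str.strip p) == nameNorm) n l) none := by
  induction l generalizing n with
  | nil => simp [mpLoop, findIdxFrom, pvOptMin]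
  | cons p rest ih =>
    by_cases hE : (PySem.Str.lower (PySem.Str.strip p) == nameNorm) = true
    · simp [mpLoop, findIdxFrom, hE, pvOptMin]
    · have hL : mpLoop nameNorm none n (p :: rest) = mpLoop nameNorm none (n + 1) rest := by
        simp [mpLoop, hE]
      have hR : findIdxFrom (fun q => PySem.Str.lower (PySem.Str.strip q) == nameNorm) n (p :: rest)
          = findIdxFrom (fun q => PySem.Str.lower (PySem.Str.strip q) == nameNorm) (n + 1) rest := by
        simp [findIdxFrom, hE]
      rw [hL, hR, ih]

-- ===== VERDICT (by name: the statement is the Claim_ definition above) =====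
theorem match_preference_spec : Claim_equal_match_preference := by
  intro resource_name preferred _
  unfold Spec_match_preference match_preference match_preference_alt
  cases h : normTok resource_name with
  | none => simpa [h] using mpLoop_eq_none_nd (PySem.Str.lower (PySem.Str.strip resource_name)) preferred 0
  | some nd => simpa [h] using mpLoop_eq_some_nd (PySem.Str.lower (PySem.Str.strip resource_name)) nd preferred 0
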